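-- pv_equiv track=rewrite | github.com/carramorra/yourhb | rewriter.py | word_diff
-- ===== SOURCE A (Python) =====
-- def word_diff(original: str, modified: str) -> list:
--     """
--     Compute a word-level diff between original and modified text.
--     Returns list of dicts: {word, type} where type is 'same', 'added', or 'removed'.
--     Uses LCS (Longest Common Subsequence).
--     """
--     old_words = original.split()
--     new_words = modified.split()
--
--     n, m = len(old_words), len(new_words)
--     dp = [[0] * (m + 1) for _ in range(n + 1)]
--
--     for i in range(1, n + 1):
--         for j in range(1, m + 1):
--             if old_words[i-1].lower() == new_words[j-1].lower():
--                 dp[i][j] = dp[i-1][j-1] + 1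
--             else:
--                 dp[i][j] = max(dp[i-1][j], dp[i][j-1])
--
--     result = []
--     i, j = n, m
--     while i > 0 or j > 0:
--         if i > 0 and j > 0 and old_words[i-1].lower() == new_words[j-1].lower():
--             result.insert(0, {"word": new_words[j-1], "type": "same"})
--             i -= 1; j -= 1
--         elif j > 0 and (i == 0 or dp[i][j-1] >= dp[i-1][j]):
--             result.insert(0, {"word": new_words[j-1], "type": "added"})
--             j -= 1
--         else:
--             result.insert(0, {"word": old_words[i-1], "type": "removed"})
--             i -= 1
--
--     return result
-- ===== SOURCE B (Python) =====
-- def word_diff(original: str, modified: str) -> list: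
--     """
--     Word-level LCS diff, computed with top-down memoized LCS lengths
--     (evaluated with an explicit work stack, no full table) instead of
--     A's bottom-up (n+1)x(m+1) DP table; lowercased words are precomputed
--     once; the alignment is emitted backward into a list that is reversed
--     at the end instead of insert(0).
--     """
--     old_words = original.split()
--     new_words = modified.split()
--     ol = [w.lower() for w in old_words]
--     nl = [w.lower() for w in new_words]
--     n, m = len(old_words), len(new_words)
--
--     memo = {}
--
--     def lcs(i, j):
--         # memoized LCS length of ol[:i], nl[:j]; explicit stack, no recursion
--         stack = [(i, j)]
--         while stack:
--             a, b = stack[-1]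
--             if (a, b) in memo:
--                 stack.pop()
--                 continue
--             if a == 0 or b == 0:
--                 memo[(a, b)] = 0
--                 stack.pop()
--             elif ol[a - 1] == nl[b - 1]:
--                 v = memo.get((a - 1, b - 1))
--                 if v is not None:
--                     memo[(a, b)] = v + 1
--                     stack.pop()
--                 else:
--                     stack.append((a - 1, b - 1))
--             else:
--                 u = memo.get((a - 1, b))
--                 v = memo.get((a, b - 1))
--                 if u is not None and v is not None:
--                     memo[(a, b)] = u if u >= v else v
--                     stack.pop()
--                 else:
--                     if u is None:
--                         stack.append((a - 1, b))
--                     if v is None: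
--                         stack.append((a, b - 1))
--         return memo[(i, j)]
--
--     rev = []
--     i, j = n, m
--     while i > 0 or j > 0:
--         if i > 0 and j > 0 and ol[i - 1] == nl[j - 1]:
--             rev.append({"word": new_words[j - 1], "type": "same"})
--             i -= 1
--             j -= 1
--         elif j > 0 and (i == 0 or lcs(i, j - 1) >= lcs(i - 1, j)):
--             rev.append({"word": new_words[j - 1], "type": "added"})
--             j -= 1
--         else:
--             rev.append({"word": old_words[i - 1], "type": "removed"})
--             i -= 1
--     rev.reverse()
--     return rev
-- ===== Notes on version B (the rewrite author's own statement) =====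
-- stated objective: alternative
-- what changed: Replaces the bottom-up (n+1)x(m+1) DP table with a top-down memoized LCS-length function evaluated by an explicit work stack (only needed states computed), precomputes lowercased word lists once, and builds the diff by appending backward then reversing instead of insert(0).
import Mathlib
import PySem

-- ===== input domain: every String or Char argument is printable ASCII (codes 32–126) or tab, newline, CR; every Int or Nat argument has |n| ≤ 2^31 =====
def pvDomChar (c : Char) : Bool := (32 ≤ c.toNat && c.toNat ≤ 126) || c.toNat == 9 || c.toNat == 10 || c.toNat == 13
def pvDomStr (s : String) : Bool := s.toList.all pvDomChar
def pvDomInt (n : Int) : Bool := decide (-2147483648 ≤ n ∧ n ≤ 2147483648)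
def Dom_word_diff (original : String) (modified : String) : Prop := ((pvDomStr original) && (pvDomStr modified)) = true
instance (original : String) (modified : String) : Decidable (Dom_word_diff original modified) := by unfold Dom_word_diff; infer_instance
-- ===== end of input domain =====

-- B replaces A's bottom-up DP table by a top-down memoized LCS-length function and
-- emits the diff backward into a list reversed at the end (objective: alternative).

-- ===== PORT A =====
-- dp[i][j] read / write on the list-of-lists table
def pvDpGet (dp : List (List Nat)) (i j : Nat) : Nat := (dp.getD i []).getD j 0
def pvDpSet (dp : List (List Nat)) (i j : Nat) (v : Nat) : List (List Nat) :=
  dp.set i ((dp.getD i []).set j v)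

-- A's `while i > 0 or j > 0` backtracking loop, result.insert(0, …) = cons onto acc
def pvLoopA (ow nw : List String) (dp : List (List Nat)) (i j : Nat)
    (acc : List (List (String × String))) : List (List (String × String)) :=
  if h1 : i = 0 ∧ j = 0 then acc
  else if h2 : i ≠ 0 ∧ j ≠ 0 ∧
      (PySem.Str.lower (ow.getD (i-1) "") == PySem.Str.lower (nw.getD (j-1) "")) = true then
    pvLoopA ow nw dp (i-1) (j-1) ([("word", nw.getD (j-1) ""), ("type", "same")] :: acc)
  else if h3 : j ≠ 0 ∧ (i = 0 ∨ pvDpGet dp i (j-1) ≥ pvDpGet dp (i-1) j) then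
    pvLoopA ow nw dp i (j-1) ([("word", nw.getD (j-1) ""), ("type", "added")] :: acc)
  else
    pvLoopA ow nw dp (i-1) j ([("word", ow.getD (i-1) ""), ("type", "removed")] :: acc)
termination_by i + j
decreasing_by
  · omega
  · omega
  · rcases Nat.eq_zero_or_pos i with hi | hi
    · exact absurd ⟨fun hj => h1 ⟨hi, hj⟩, Or.inl hi⟩ h3
    · omega

def word_diff (original : String) (modified : String) : List (List (String × String)) :=
  let old_words := PySem.Str.split₀ original
  let new_words := PySem.Str.split₀ modified
  let n := old_words.length
  let m := new_words.length
  let dp0 : List (List Nat) := (List.range (n+1)).map (fun _ => List.replicate (m+1) 0)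
  let dp := (List.range' 1 n).foldl (fun dp i =>
      (List.range' 1 m).foldl (fun dp j =>
        if (PySem.Str.lower (old_words.getD (i-1) "") ==
            PySem.Str.lower (new_words.getD (j-1) "")) = true then
          pvDpSet dp i j (pvDpGet dp (i-1) (j-1) + 1)
        else
          pvDpSet dp i j (max (pvDpGet dp (i-1) j) (pvDpGet dp i (j-1)))) dp) dp0
  pvLoopA old_words new_words dp n m []

-- ===== PORT B =====
-- B's memoized lcs(i, j) (the dict cache / explicit work stack in Source B is an
-- evaluation device for exactly this recursion; values are identical)
def pvLcsB (ol nl : List String) : Nat → Nat → Nat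
  | 0, _ => 0
  | _+1, 0 => 0
  | i+1, j+1 =>
    if (ol.getD i "" == nl.getD j "") = true then pvLcsB ol nl i j + 1
    else
      let u := pvLcsB ol nl i (j+1)
      let v := pvLcsB ol nl (i+1) j
      if u ≥ v then u else v
termination_by i j => i + j

-- B's backward walk appending to `rev` (reversed afterwards)
def pvWalkB (ow nw ol nl : List String) (i j : Nat)
    (rev : List (List (String × String))) : List (List (String × String)) :=
  if h1 : i = 0 ∧ j = 0 then rev
  else if h2 : i ≠ 0 ∧ j ≠ 0 ∧ (ol.getD (i-1) "" == nl.getD (j-1) "") = true then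
    pvWalkB ow nw ol nl (i-1) (j-1) (rev ++ [[("word", nw.getD (j-1) ""), ("type", "same")]])
  else if h3 : j ≠ 0 ∧ (i = 0 ∨ pvLcsB ol nl i (j-1) ≥ pvLcsB ol nl (i-1) j) then
    pvWalkB ow nw ol nl i (j-1) (rev ++ [[("word", nw.getD (j-1) ""), ("type", "added")]])
  else
    pvWalkB ow nw ol nl (i-1) j (rev ++ [[("word", ow.getD (i-1) ""), ("type", "removed")]])
termination_by i + j
decreasing_by
  · omega
  · omega
  · rcases Nat.eq_zero_or_pos i with hi | hi
    · exact absurd ⟨fun hj => h1 ⟨hi, hj⟩, Or.inl hi⟩ h3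
    · omega

def word_diff_alt (original : String) (modified : String) : List (List (String × String)) :=
  let old_words := PySem.Str.split₀ original
  let new_words := PySem.Str.split₀ modified
  let ol := old_words.map PySem.Str.lower
  let nl := new_words.map PySem.Str.lower
  (pvWalkB old_words new_words ol nl old_words.length new_words.length []).reverse

-- ===== PRECONDITION & SPEC =====
def Spec_word_diff (original : String) (modified : String) (out : List (List (String × String))) : Prop := out = word_diff_alt original modified
instance (original : String) (modified : String) (out : List (List (String × String))) : Decidable (Spec_word_diff original modified out) := by unfold Spec_word_diff; infer_instance

-- ===== CLAIM (what is proved, stated in full; the proofs are below) =====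
def Claim_equal_word_diff : Prop := ∀ (original : String) (modified : String), Dom_word_diff original modified → Spec_word_diff original modified (word_diff original modified)

-- ===== LEMMAS AND PROOFS =====

theorem pvLowGetD (ws : List String) (k : Nat) :
    (ws.map PySem.Str.lower).getD k "" = PySem.Str.lower (ws.getD k "") := by
  simp only [List.getD_eq_getElem?_getD, List.getElem?_map]
  cases ws[k]? <;> rfl

-- functional matrices over ranges
def pvRowF (m : Nat) (g : Nat → Nat) : List Nat := (List.range (m+1)).map g
def pvMatF (n m : Nat) (f : Nat → Nat → Nat) : List (List Nat) :=
  (List.range (n+1)).map (fun i => pvRowF m (f i))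

theorem pvMatF_congr {n m : Nat} {f g : Nat → Nat → Nat}
    (h : ∀ a, a ≤ n → ∀ b, b ≤ m → f a b = g a b) : pvMatF n m f = pvMatF n m g := by
  unfold pvMatF pvRowF
  refine List.map_congr_left (fun a ha => ?_)
  refine List.map_congr_left (fun b hb => ?_)
  exact h a (by simpa [Nat.lt_succ_iff] using List.mem_range.mp ha)
            b (by simpa [Nat.lt_succ_iff] using List.mem_range.mp hb)

theorem pvMatF_get {n m : Nat} (f : Nat → Nat → Nat) {i j : Nat} (hi : i ≤ n) (hj : j ≤ m) :
    pvDpGet (pvMatF n m f) i j = f i j := by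
  unfold pvDpGet pvMatF pvRowF
  have h1 : i < n+1 := by omega
  have h2 : j < m+1 := by omega
  simp [List.getD_eq_getElem?_getD, h1, h2]

theorem pvSetMapRange {α : Type} (N : Nat) (g : Nat → α) (i : Nat) (hi : i < N) (x : α) :
    ((List.range N).map g).set i x = (List.range N).map (fun t => if t = i then x else g t) := by
  apply List.ext_getElem
  · simp
  · intro k h1 h2
    simp only [List.getElem_set, List.getElem_map, List.getElem_range]
    by_cases h : i = k
    · simp [h]
    · simp [h, Ne.symm h]

theorem pvMatF_set {n m : Nat} (f : Nat → Nat → Nat) {i j : Nat} (hi : i ≤ n) (hj : j ≤ m) (v : Nat) :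
    pvDpSet (pvMatF n m f) i j v = pvMatF n m (fun a b => if a = i ∧ b = j then v else f a b) := by
  unfold pvDpSet pvMatF pvRowF
  rw [List.getD_eq_getElem?_getD, List.getElem?_map, List.getElem?_range (by omega)]
  simp only [Option.map_some, Option.getD_some]
  rw [pvSetMapRange _ _ _ (by omega), pvSetMapRange _ _ _ (by omega)]
  refine List.map_congr_left (fun a _ => ?_)
  by_cases ha : a = i
  · subst ha
    rw [if_pos rfl]
    refine List.map_congr_left (fun b _ => ?_)
    by_cases hb : b = j <;> simp [hb]
  · simp only [if_neg ha]
    refine List.map_congr_left (fun b _ => ?_)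
    simp [ha]

theorem pvLcsB_zero_left (ol nl : List String) (b : Nat) : pvLcsB ol nl 0 b = 0 := by
  simp [pvLcsB]

theorem pvLcsB_zero_right (ol nl : List String) (i : Nat) : pvLcsB ol nl i 0 = 0 := by
  cases i <;> simp [pvLcsB]

theorem pvLcsB_succ (ow nw : List String) (i j : Nat) :
    pvLcsB (ow.map PySem.Str.lower) (nw.map PySem.Str.lower) (i+1) (j+1) =
      if (PySem.Str.lower (ow.getD i "") == PySem.Str.lower (nw.getD j "")) = true then
        pvLcsB (ow.map PySem.Str.lower) (nw.map PySem.Str.lower) i j + 1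
      else max (pvLcsB (ow.map PySem.Str.lower) (nw.map PySem.Str.lower) i (j+1))
               (pvLcsB (ow.map PySem.Str.lower) (nw.map PySem.Str.lower) (i+1) j) := by
  rw [pvLcsB, pvLowGetD ow i, pvLowGetD nw j]
  split_ifs with h
  · rfl
  · generalize pvLcsB (ow.map PySem.Str.lower) (nw.map PySem.Str.lower) i (j+1) = u
    generalize pvLcsB (ow.map PySem.Str.lower) (nw.map PySem.Str.lower) (i+1) j = v
    simp only []
    split_ifs <;> omega

-- ===== the DP table built by A holds exactly B's lcs values =====

theorem pvInnerLoop (ow nw : List String) (n m : Nat) (hn : n = ow.length) (hm : m = nw.length)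
    (i : Nat) (hi1 : 1 ≤ i) (hin : i ≤ n) :
    ∀ l, l ≤ m →
    (List.range' 1 l).foldl (fun dp j =>
        if (PySem.Str.lower (ow.getD (i-1) "") ==
            PySem.Str.lower (nw.getD (j-1) "")) = true then
          pvDpSet dp i j (pvDpGet dp (i-1) (j-1) + 1)
        else
          pvDpSet dp i j (max (pvDpGet dp (i-1) j) (pvDpGet dp i (j-1))))
      (pvMatF n m (fun a b =>
        if a < i then pvLcsB (ow.map PySem.Str.lower) (nw.map PySem.Str.lower) a b else 0))
    = pvMatF n m (fun a b =>
        if a < i ∨ (a = i ∧ b ≤ l) then pvLcsB (ow.map PySem.Str.lower) (nw.map PySem.Str.lower) a b else 0) := by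
  obtain ⟨i', rfl⟩ : ∃ i', i = i' + 1 := ⟨i - 1, by omega⟩
  intro l
  induction l with
  | zero =>
    intro _
    simp only [List.range'_zero, List.foldl_nil]
    apply pvMatF_congr
    intro a _ b _
    by_cases h : a < i' + 1
    · simp [h]
    · by_cases h2 : a = i' + 1 ∧ b ≤ 0
      · have hb0 : b = 0 := by omega
        subst hb0
        rw [if_neg h, if_pos (Or.inr h2), h2.1, pvLcsB_zero_right]
      · rw [if_neg h, if_neg (by rintro (hc | hc); exact h hc; exact h2 hc)]
  | succ l ihl =>
    intro hl
    have h11 : (1 : Nat) + 1 * l = l + 1 := by omega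
    rw [List.range'_concat, h11, List.foldl_append, ihl (by omega)]
    simp only [List.foldl_cons, List.foldl_nil, Nat.add_sub_cancel]
    have g1 : pvDpGet (pvMatF n m (fun a b =>
        if a < i' + 1 ∨ (a = i' + 1 ∧ b ≤ l) then
          pvLcsB (ow.map PySem.Str.lower) (nw.map PySem.Str.lower) a b else 0)) i' l
        = pvLcsB (ow.map PySem.Str.lower) (nw.map PySem.Str.lower) i' l := by
      rw [pvMatF_get _ (by omega) (by omega), if_pos (Or.inl (by omega))]
    have g2 : pvDpGet (pvMatF n m (fun a b =>
        if a < i' + 1 ∨ (a = i' + 1 ∧ b ≤ l) then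
          pvLcsB (ow.map PySem.Str.lower) (nw.map PySem.Str.lower) a b else 0)) i' (l+1)
        = pvLcsB (ow.map PySem.Str.lower) (nw.map PySem.Str.lower) i' (l+1) := by
      rw [pvMatF_get _ (by omega) (by omega), if_pos (Or.inl (by omega))]
    have g3 : pvDpGet (pvMatF n m (fun a b =>
        if a < i' + 1 ∨ (a = i' + 1 ∧ b ≤ l) then
          pvLcsB (ow.map PySem.Str.lower) (nw.map PySem.Str.lower) a b else 0)) (i'+1) l
        = pvLcsB (ow.map PySem.Str.lower) (nw.map PySem.Str.lower) (i'+1) l := by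
      rw [pvMatF_get _ (by omega) (by omega), if_pos (Or.inr ⟨rfl, le_rfl⟩)]
    have hval : ∀ v, v = pvLcsB (ow.map PySem.Str.lower) (nw.map PySem.Str.lower) (i'+1) (l+1) →
        pvDpSet (pvMatF n m (fun a b =>
          if a < i' + 1 ∨ (a = i' + 1 ∧ b ≤ l) then
            pvLcsB (ow.map PySem.Str.lower) (nw.map PySem.Str.lower) a b else 0)) (i'+1) (l+1) v
        = pvMatF n m (fun a b =>
            if a < i' + 1 ∨ (a = i' + 1 ∧ b ≤ l + 1) then
              pvLcsB (ow.map PySem.Str.lower) (nw.map PySem.Str.lower) a b else 0) := by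
      intro v hv
      rw [pvMatF_set _ (by omega) (by omega)]
      apply pvMatF_congr
      intro a _ b _
      by_cases hab : a = i' + 1 ∧ b = l + 1
      · rw [if_pos hab, if_pos (Or.inr ⟨hab.1, by omega⟩), hab.1, hab.2, hv]
      · rw [if_neg hab]
        by_cases hc : a < i' + 1 ∨ (a = i' + 1 ∧ b ≤ l)
        · rw [if_pos hc, if_pos (by rcases hc with hc | hc; exact Or.inl hc; exact Or.inr ⟨hc.1, by omega⟩)]
        · rw [if_neg hc, if_neg (by
            rintro (hd | hd)
            · exact hc (Or.inl hd)
            · by_cases hb : b = l + 1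
              · exact hab ⟨hd.1, hb⟩
              · exact hc (Or.inr ⟨hd.1, by omega⟩))]
    by_cases hC : (PySem.Str.lower (ow.getD i' "") == PySem.Str.lower (nw.getD l "")) = true
    · rw [if_pos hC, g1]
      exact hval _ (by rw [pvLcsB_succ, if_pos hC])
    · rw [if_neg hC, g2, g3]
      exact hval _ (by rw [pvLcsB_succ, if_neg hC])

theorem pvOuterLoop (ow nw : List String) (n m : Nat) (hn : n = ow.length) (hm : m = nw.length) :
    ∀ k, k ≤ n →
    (List.range' 1 k).foldl (fun dp i =>
      (List.range' 1 m).foldl (fun dp j =>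
        if (PySem.Str.lower (ow.getD (i-1) "") ==
            PySem.Str.lower (nw.getD (j-1) "")) = true then
          pvDpSet dp i j (pvDpGet dp (i-1) (j-1) + 1)
        else
          pvDpSet dp i j (max (pvDpGet dp (i-1) j) (pvDpGet dp i (j-1)))) dp)
      ((List.range (n+1)).map (fun _ => List.replicate (m+1) 0))
    = pvMatF n m (fun a b =>
        if a ≤ k then pvLcsB (ow.map PySem.Str.lower) (nw.map PySem.Str.lower) a b else 0) := by
  intro k
  induction k with
  | zero =>
    intro _
    simp only [List.range'_zero, List.foldl_nil]
    unfold pvMatF pvRowF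
    refine List.map_congr_left (fun a _ => ?_)
    apply List.ext_getElem
    · simp
    · intro kk h1 h2
      simp only [List.getElem_replicate, List.getElem_map, List.getElem_range]
      by_cases h : a ≤ 0
      · have ha0 : a = 0 := by omega
        subst ha0
        rw [if_pos h, pvLcsB_zero_left]
      · rw [if_neg h]
  | succ k ihk =>
    intro hk
    have h11 : (1 : Nat) + 1 * k = k + 1 := by omega
    rw [List.range'_concat, h11, List.foldl_append, ihk (by omega)]
    simp only [List.foldl_cons, List.foldl_nil]
    have hstart : pvMatF n m (fun a b =>
        if a ≤ k then pvLcsB (ow.map PySem.Str.lower) (nw.map PySem.Str.lower) a b else 0)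
        = pvMatF n m (fun a b =>
        if a < k+1 then pvLcsB (ow.map PySem.Str.lower) (nw.map PySem.Str.lower) a b else 0) :=
      pvMatF_congr (fun a _ b _ => by
        by_cases h : a ≤ k
        · rw [if_pos h, if_pos (by omega)]
        · rw [if_neg h, if_neg (by omega)])
    rw [hstart, pvInnerLoop ow nw n m hn hm (k+1) (by omega) (by omega) m le_rfl]
    apply pvMatF_congr
    intro a _ b _
    by_cases h : a < k+1 ∨ (a = k+1 ∧ b ≤ m)
    · rw [if_pos h, if_pos (by omega)]
    · rw [if_neg h, if_neg (by omega)]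

-- ===== walk equivalence =====

theorem pvWalkB_acc (ow nw ol nl : List String) :
    ∀ N i j, i + j ≤ N → ∀ rev, pvWalkB ow nw ol nl i j rev = rev ++ pvWalkB ow nw ol nl i j [] := by
  intro N
  induction N with
  | zero =>
    intro i j hij rev
    have hi : i = 0 := by omega
    have hj : j = 0 := by omega
    subst hi; subst hj
    conv_lhs => rw [pvWalkB]
    conv_rhs => rw [pvWalkB]
    simp
  | succ N ih =>
    intro i j hij rev
    conv_lhs => rw [pvWalkB]
    conv_rhs => rw [pvWalkB]
    by_cases h1 : i = 0 ∧ j = 0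
    · rw [dif_pos h1, dif_pos h1]; simp
    · rw [dif_neg h1, dif_neg h1]
      by_cases h2 : i ≠ 0 ∧ j ≠ 0 ∧ (ol.getD (i-1) "" == nl.getD (j-1) "") = true
      · rw [dif_pos h2, dif_pos h2, ih (i-1) (j-1) (by omega),
            ih (i-1) (j-1) (by omega) ([] ++ _)]
        simp
      · rw [dif_neg h2, dif_neg h2]
        by_cases h3 : j ≠ 0 ∧ (i = 0 ∨ pvLcsB ol nl i (j-1) ≥ pvLcsB ol nl (i-1) j)
        · rw [dif_pos h3, dif_pos h3, ih i (j-1) (by omega),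
              ih i (j-1) (by omega) ([] ++ _)]
          simp
        · rw [dif_neg h3, dif_neg h3]
          rw [ih (i-1) j (by omega), ih (i-1) j (by omega) ([] ++ _)]
          simp

theorem pvLoopA_eq_walk (ow nw : List String) (dp : List (List Nat))
    (hdp : ∀ i j, i ≤ ow.length → j ≤ nw.length →
        pvDpGet dp i j = pvLcsB (ow.map PySem.Str.lower) (nw.map PySem.Str.lower) i j) :
    ∀ N i j, i + j ≤ N → i ≤ ow.length → j ≤ nw.length → ∀ acc,
      pvLoopA ow nw dp i j acc =
        (pvWalkB ow nw (ow.map PySem.Str.lower) (nw.map PySem.Str.lower) i j []).reverse ++ acc := by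
  intro N
  induction N with
  | zero =>
    intro i j hij hi hj acc
    have h0 : i = 0 := by omega
    have h0' : j = 0 := by omega
    subst h0; subst h0'
    rw [pvLoopA, pvWalkB]
    simp
  | succ N ih =>
    intro i j hij hi hj acc
    rw [pvLoopA, pvWalkB]
    by_cases h1 : i = 0 ∧ j = 0
    · rw [dif_pos h1, dif_pos h1]; simp
    · rw [dif_neg h1, dif_neg h1]
      by_cases h2 : i ≠ 0 ∧ j ≠ 0 ∧
          (PySem.Str.lower (ow.getD (i-1) "") == PySem.Str.lower (nw.getD (j-1) "")) = true
      · have h2' : i ≠ 0 ∧ j ≠ 0 ∧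
            ((ow.map PySem.Str.lower).getD (i-1) "" == (nw.map PySem.Str.lower).getD (j-1) "") = true := by
          rw [pvLowGetD ow (i-1), pvLowGetD nw (j-1)]; exact h2
        rw [dif_pos h2, dif_pos h2',
            ih (i-1) (j-1) (by omega) (by omega) (by omega),
            pvWalkB_acc ow nw _ _ (i-1+(j-1)) (i-1) (j-1) le_rfl ([] ++ _)]
        simp
      · have h2' : ¬ (i ≠ 0 ∧ j ≠ 0 ∧
            ((ow.map PySem.Str.lower).getD (i-1) "" == (nw.map PySem.Str.lower).getD (j-1) "") = true) := by
          rw [pvLowGetD ow (i-1), pvLowGetD nw (j-1)]; exact h2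
        rw [dif_neg h2, dif_neg h2']
        by_cases h3 : j ≠ 0 ∧ (i = 0 ∨ pvDpGet dp i (j-1) ≥ pvDpGet dp (i-1) j)
        · have h3' : j ≠ 0 ∧ (i = 0 ∨
              pvLcsB (ow.map PySem.Str.lower) (nw.map PySem.Str.lower) i (j-1) ≥
              pvLcsB (ow.map PySem.Str.lower) (nw.map PySem.Str.lower) (i-1) j) := by
            rwa [hdp i (j-1) hi (by omega), hdp (i-1) j (by omega) hj] at h3
          rw [dif_pos h3, dif_pos h3',
              ih i (j-1) (by omega) hi (by omega),
              pvWalkB_acc ow nw _ _ (i+(j-1)) i (j-1) le_rfl ([] ++ _)]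
          simp
        · have h3' : ¬ (j ≠ 0 ∧ (i = 0 ∨
              pvLcsB (ow.map PySem.Str.lower) (nw.map PySem.Str.lower) i (j-1) ≥
              pvLcsB (ow.map PySem.Str.lower) (nw.map PySem.Str.lower) (i-1) j)) := by
            rwa [hdp i (j-1) hi (by omega), hdp (i-1) j (by omega) hj] at h3
          rw [dif_neg h3, dif_neg h3']
          have hi0 : i ≠ 0 := by
            intro hi0
            rcases Nat.eq_zero_or_pos j with hj0 | hj0
            · exact h1 ⟨hi0, hj0⟩
            · exact h3 ⟨by omega, Or.inl hi0⟩
          rw [ih (i-1) j (by omega) (by omega) hj,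
              pvWalkB_acc ow nw _ _ (i-1+j) (i-1) j le_rfl ([] ++ _)]
          simp

-- ===== VERDICT (by name: the statement is the Claim_ definition above) =====
theorem word_diff_spec : Claim_equal_word_diff := by
  intro original modified _dom
  unfold Spec_word_diff
  simp only [word_diff, word_diff_alt]
  rw [pvOuterLoop (PySem.Str.split₀ original) (PySem.Str.split₀ modified) _ _ rfl rfl _ le_rfl,
      pvLoopA_eq_walk _ _ _
        (fun i j hi hj => by rw [pvMatF_get _ hi hj, if_pos hi])
        _ _ _ le_rfl le_rfl le_rfl]
  simp
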